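-- pv_equiv track=rewrite | github.com/bactopia/bactopia.github.io | bin/generator_utils.py | _render_fields_table
-- ===== SOURCE A (Python) =====
-- def escape_mdx(text):
--     """Escape characters that break MDX parsing."""
--     text = text.replace('<', '&lt;').replace('>', '&gt;')
--     text = text.replace('{', '&#123;').replace('}', '&#125;')
--     return text
--
-- def _render_fields_table(fields):
--     """Render a fields table, choosing columns based on whether types are present."""
--     lines = []
--     has_types = any(f.get('type') for f in fields)
--     if has_types:
--         lines.append('| Field | Type | Description |')
--         lines.append('|-------|------|-------------|')
--         for field in fields:
--             fname = f'`{field["name"]}`' if field['name'] else ''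
--             ftype = f'`{field["type"]}`' if field.get('type') else ''
--             fdesc = escape_mdx(field.get('description', ''))
--             lines.append(f'| {fname} | {ftype} | {fdesc} |')
--     else:
--         lines.append('| Field | Description |')
--         lines.append('|-------|-------------|')
--         for field in fields:
--             fname = f'`{field["name"]}`' if field['name'] else ''
--             fdesc = escape_mdx(field.get('description', ''))
--             lines.append(f'| {fname} | {fdesc} |')
--     lines.append('')
--     return lines
-- ===== SOURCE B (Python) =====
-- def escape_mdx(text):
--     """Escape characters that break MDX parsing."""
--     text = text.replace('<', '&lt;').replace('>', '&gt;')
--     text = text.replace('{', '&#123;').replace('}', '&#125;')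
--     return text
--
-- def _render_fields_table(fields):
--     """Column-oriented: build each column as its own list, then zip columns into rows."""
--     names = ['`%s`' % f['name'] if f['name'] else '' for f in fields]
--     types = ['`%s`' % f.get('type') if f.get('type') else '' for f in fields]
--     descs = [escape_mdx(f.get('description', '')) for f in fields]
--     if any(types):
--         head = ['| Field | Type | Description |', '|-------|------|-------------|']
--         cols = [names, types, descs]
--     else:
--         head = ['| Field | Description |', '|-------|-------------|']
--         cols = [names, descs]
--     rows = ['| ' + ' | '.join(cells) + ' |' for cells in zip(*cols)]
--     return head + rows + ['']
-- ===== Notes on version B (the rewrite author's own statement) =====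
-- stated objective: alternative
-- what changed: Replaces A's two duplicated per-field row loops by a column-oriented construction: each column (names, types, descriptions) is built as its own list and the rows are produced by zipping the chosen columns together.
import Mathlib
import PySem

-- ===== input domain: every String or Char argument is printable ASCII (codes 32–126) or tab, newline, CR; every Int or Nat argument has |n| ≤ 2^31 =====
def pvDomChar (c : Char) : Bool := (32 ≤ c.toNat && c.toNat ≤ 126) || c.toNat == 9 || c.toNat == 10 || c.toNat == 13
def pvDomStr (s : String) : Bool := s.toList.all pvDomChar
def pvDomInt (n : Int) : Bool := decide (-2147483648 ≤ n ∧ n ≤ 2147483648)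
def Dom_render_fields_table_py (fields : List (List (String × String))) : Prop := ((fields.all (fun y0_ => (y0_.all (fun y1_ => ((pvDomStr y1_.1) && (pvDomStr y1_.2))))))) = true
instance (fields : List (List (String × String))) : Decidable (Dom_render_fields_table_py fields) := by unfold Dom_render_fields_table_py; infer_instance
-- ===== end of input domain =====

-- B is column-oriented: it builds the name/type/description columns as separate lists
-- and zips them into rows (objective: alternative decomposition, same cost).

-- shared same-module helper escape_mdx (identical in Source A and Source B)
def escapeMdx (text : String) : String :=
  PySem.Str.replace (PySem.Str.replace
    (PySem.Str.replace (PySem.Str.replace text "<" "&lt;") ">" "&gt;")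
    "{" "&#123;") "}" "&#125;"

-- dict lookup on the association list: first match (Python dict .get)
def dget (f : List (String × String)) (k : String) : Option String :=
  (f.find? (fun p => p.1 == k)).map (·.2)

-- ===== PORT A =====
def render_fields_table_py (fields : List (List (String × String))) : List String :=
  let lines : List String := []
  let has_types := fields.any (fun f => decide ((dget f "type").getD "" ≠ ""))
  if has_types then
    let lines := lines ++ ["| Field | Type | Description |"]
    let lines := lines ++ ["|-------|------|-------------|"]
    let lines := fields.foldl (fun lines field =>
      let fname := if (dget field "name").getD "" ≠ "" then "`" ++ (dget field "name").getD "" ++ "`" else ""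
      let ftype := if (dget field "type").getD "" ≠ "" then "`" ++ (dget field "type").getD "" ++ "`" else ""
      let fdesc := escapeMdx ((dget field "description").getD "")
      lines ++ ["| " ++ fname ++ " | " ++ ftype ++ " | " ++ fdesc ++ " |"]) lines
    lines ++ [""]
  else
    let lines := lines ++ ["| Field | Description |"]
    let lines := lines ++ ["|-------|-------------|"]
    let lines := fields.foldl (fun lines field =>
      let fname := if (dget field "name").getD "" ≠ "" then "`" ++ (dget field "name").getD "" ++ "`" else ""
      let fdesc := escapeMdx ((dget field "description").getD "")
      lines ++ ["| " ++ fname ++ " | " ++ fdesc ++ " |"]) lines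
    lines ++ [""]

-- ===== PORT B =====
def render_fields_table_py_alt (fields : List (List (String × String))) : List String :=
  let names := fields.map (fun f =>
    if (dget f "name").getD "" ≠ "" then "`" ++ (dget f "name").getD "" ++ "`" else "")
  let types := fields.map (fun f =>
    if (dget f "type").getD "" ≠ "" then "`" ++ (dget f "type").getD "" ++ "`" else "")
  let descs := fields.map (fun f => escapeMdx ((dget f "description").getD ""))
  if types.any (fun t => decide (t ≠ "")) then
    let head := ["| Field | Type | Description |", "|-------|------|-------------|"]
    let rows := (names.zip (types.zip descs)).map (fun c =>
      "| " ++ PySem.Str.join " | " [c.1, c.2.1, c.2.2] ++ " |")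
    head ++ rows ++ [""]
  else
    let head := ["| Field | Description |", "|-------|-------------|"]
    let rows := (names.zip descs).map (fun c =>
      "| " ++ PySem.Str.join " | " [c.1, c.2] ++ " |")
    head ++ rows ++ [""]

-- ===== PRECONDITION & SPEC =====
-- Pre_ excludes only fields lacking the key "name", on which Python A raises KeyError
-- (field["name"] is a direct index); B raises there too.
def Pre_render_fields_table_py (fields : List (List (String × String))) : Prop :=
  (fields.all (fun f => f.any (fun p => p.1 == "name"))) = true
instance (fields : List (List (String × String))) : Decidable (Pre_render_fields_table_py fields) := by unfold Pre_render_fields_table_py; infer_instance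
def pvWitness_render_fields_table_py : (List (List (String × String))) :=
  [[("name", "id"), ("description", "the <id>")]]
def Spec_render_fields_table_py (fields : List (List (String × String))) (out : List String) : Prop := out = render_fields_table_py_alt fields
instance (fields : List (List (String × String))) (out : List String) : Decidable (Spec_render_fields_table_py fields out) := by unfold Spec_render_fields_table_py; infer_instance

-- ===== CLAIM (what is proved, stated in full; the proofs are below) =====
def Claim_equal_render_fields_table_py : Prop := ∀ (fields : List (List (String × String))), Dom_render_fields_table_py fields → Pre_render_fields_table_py fields → Spec_render_fields_table_py fields (render_fields_table_py fields)

-- ===== LEMMAS AND PROOFS =====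

theorem join_three (a b c : String) :
    PySem.Str.join " | " [a, b, c] = a ++ " | " ++ b ++ " | " ++ c := by
  simp [PySem.Str.join, PySem.Chars.join, List.intercalate]
  apply String.toList_injective
  simp [String.toList_ofList]

theorem join_two (a b : String) :
    PySem.Str.join " | " [a, b] = a ++ " | " ++ b := by
  simp [PySem.Str.join, PySem.Chars.join, List.intercalate]
  apply String.toList_injective
  simp [String.toList_ofList]

-- the backtick-wrapped cell is nonempty, so the formatted type column is '' exactly when the raw type is ''
theorem tick_ne_empty (s : String) : ("`" ++ s ++ "`") ≠ "" := by
  intro h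
  have := congrArg String.toList h
  simp at this

theorem has_types_eq (fields : List (List (String × String))) :
    ((fields.map (fun f =>
        if (dget f "type").getD "" ≠ "" then "`" ++ (dget f "type").getD "" ++ "`" else "")).any
      (fun t => decide (t ≠ "")))
    = fields.any (fun f => decide ((dget f "type").getD "" ≠ "")) := by
  induction fields with
  | nil => rfl
  | cons f fs ih =>
    simp only [List.map_cons, List.any_cons, ih]
    by_cases h : (dget f "type").getD "" ≠ ""
    · simp [h, tick_ne_empty]
    · simp [h]

theorem zip3_map {α : Type} (xs : List α) (f g h : α → String) :
    ((xs.map f).zip ((xs.map g).zip (xs.map h))).map (fun c =>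
        "| " ++ PySem.Str.join " | " [c.1, c.2.1, c.2.2] ++ " |")
    = xs.map (fun x => "| " ++ PySem.Str.join " | " [f x, g x, h x] ++ " |") := by
  induction xs with
  | nil => rfl
  | cons x xs ih => simp [ih]

theorem zip2_map {α : Type} (xs : List α) (f g : α → String) :
    ((xs.map f).zip (xs.map g)).map (fun c => "| " ++ PySem.Str.join " | " [c.1, c.2] ++ " |")
    = xs.map (fun x => "| " ++ PySem.Str.join " | " [f x, g x] ++ " |") := by
  induction xs with
  | nil => rfl
  | cons x xs ih => simp [ih]

-- ===== VERDICT (by name: the statement is the Claim_ definition above) =====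
theorem render_fields_table_py_spec : Claim_equal_render_fields_table_py := by
  intro fields _ _
  unfold Spec_render_fields_table_py render_fields_table_py render_fields_table_py_alt
  simp only [has_types_eq]
  by_cases h : fields.any (fun f => decide ((dget f "type").getD "" ≠ "")) = true
  · simp only [h, if_true, PySem.List.foldl_append_singleton_eq_map]
    rw [zip3_map]
    simp [join_three, String.append_assoc]
  · simp only [h, if_false, Bool.false_eq_true, PySem.List.foldl_append_singleton_eq_map]
    rw [zip2_map]
    simp [join_two, String.append_assoc]
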